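-- pv_equiv track=rewrite | github.com/zhang3r/foobarsolutions | save_beta_rabbit.py | answer
-- ===== SOURCE A (Python) =====
-- def answer(food, grid):
--     n = len(grid)
--     a_grid = [[set() for i in range(n)] for j in range(n)]
--     a_grid[0][0] = {grid[0][0]}
--
--     for row, x_val in enumerate(grid):
--         for col, y_val in enumerate(x_val):
--             if row != 0:
--                 a_grid[row][col] |= {y_val + x for x in a_grid[row-1][col] if (y_val + x) <= food}
--             if col != 0:
--             	a_grid[row][col] |= {y_val + x for x in a_grid[row][col-1] if (y_val + x) <= food}
--     ans_arr = sorted(a_grid[n-1][n-1], reverse=True)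
--
--     for food_left in ans_arr:
--         if food_left <= food:
--             return food-food_left
--     return -1
-- ===== SOURCE B (Python) =====
-- def answer(food, grid):
--     n = len(grid)
--     memo = {}
--
--     def reach(r, c):
--         key = (r, c)
--         if key in memo:
--             return memo[key]
--         if c >= len(grid[r]):
--             s = set()
--         elif r == 0 and c == 0:
--             s = {grid[0][0]}
--         else:
--             v = grid[r][c]
--             s = set()
--             if r > 0:
--                 for x in reach(r - 1, c):
--                     if v + x <= food:
--                         s.add(v + x)
--             if c > 0:
--                 for x in reach(r, c - 1):
--                     if v + x <= food:
--                         s.add(v + x)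
--         memo[key] = s
--         return s
--
--     best = None
--     for x in reach(n - 1, n - 1):
--         if x <= food and (best is None or x > best):
--             best = x
--     return food - best if best is not None else -1
-- ===== Notes on version B (the rewrite author's own statement) =====
-- stated objective: alternative
-- what changed: Replaces A's bottom-up n-by-n table of per-cell reachable-sum sets (filled row-major with in-place set unions, then sorted descending and scanned) by a top-down memoized recursion from the target cell plus a single running-maximum pass over the final set.
import Mathlib
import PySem

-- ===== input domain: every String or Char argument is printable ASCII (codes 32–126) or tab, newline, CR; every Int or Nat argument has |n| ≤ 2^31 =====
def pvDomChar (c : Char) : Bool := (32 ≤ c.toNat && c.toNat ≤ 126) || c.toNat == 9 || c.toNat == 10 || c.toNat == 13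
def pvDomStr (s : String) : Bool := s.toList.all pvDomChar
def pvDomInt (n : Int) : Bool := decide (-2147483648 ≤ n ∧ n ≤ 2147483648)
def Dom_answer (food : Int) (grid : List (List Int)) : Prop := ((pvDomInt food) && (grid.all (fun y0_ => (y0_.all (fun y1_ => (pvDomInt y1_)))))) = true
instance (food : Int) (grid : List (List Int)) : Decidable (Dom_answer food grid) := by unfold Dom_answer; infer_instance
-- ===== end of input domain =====

-- B replaces A's bottom-up n×n table of per-cell sets by a top-down memoized recursion from the
-- target cell plus a single running-maximum pass instead of sorting; equivalence of the return
-- value is proved on Pre_answer (the inputs where A returns).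

-- ===== PORT A =====
-- {y + x for x in s if y + x <= food}
def pvComp (food y : Int) (s : PySem.Set Int) : PySem.Set Int :=
  PySem.Set.ofList ((s.filter (fun x => decide (y + x ≤ food))).map (fun x => y + x))

-- a_grid[i][j]
def pvGet2 (ag : List (List (PySem.Set Int))) (i j : Int) : PySem.Set Int :=
  PySem.List.pyGetD (PySem.List.pyGetD ag i []) j []

-- a_grid[i][j] = v
def pvSet2 (ag : List (List (PySem.Set Int))) (i j : Int) (v : PySem.Set Int) : List (List (PySem.Set Int)) :=
  PySem.List.pySetD ag i (PySem.List.pySetD (PySem.List.pyGetD ag i []) j v)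

-- body of A's inner loop, cy = (col, y_val)
def pvInner (food : Int) (row : Int) (ag : List (List (PySem.Set Int))) (cy : Int × Int) : List (List (PySem.Set Int)) :=
  let ag1 := if row ≠ 0 then
      pvSet2 ag row cy.1 (PySem.Set.union (pvGet2 ag row cy.1) (pvComp food cy.2 (pvGet2 ag (row - 1) cy.1)))
    else ag
  if cy.1 ≠ 0 then
      pvSet2 ag1 row cy.1 (PySem.Set.union (pvGet2 ag1 row cy.1) (pvComp food cy.2 (pvGet2 ag1 row (cy.1 - 1))))
    else ag1

-- A's final 'for food_left in ans_arr' loop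
def pvAnsLoop (food : Int) : List Int → Int
  | [] => -1
  | h :: t => if h ≤ food then food - h else pvAnsLoop food t

def answer (food : Int) (grid : List (List Int)) : Int :=
  let n : Int := PySem.List.len grid
  let ag0 : List (List (PySem.Set Int)) :=
    (PySem.List.pyRange 0 n 1).map (fun _ => (PySem.List.pyRange 0 n 1).map (fun _ => ([] : PySem.Set Int)))
  let ag1 := pvSet2 ag0 0 0 (PySem.Set.add [] (PySem.List.pyGetD (PySem.List.pyGetD grid 0 []) 0 0))
  let ag2 := (PySem.List.enumerate grid 0).foldl
      (fun ag rx => (PySem.List.enumerate rx.2 0).foldl (pvInner food rx.1) ag) ag1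
  let ansArr := PySem.List.sorted (pvGet2 ag2 (n - 1) (n - 1)) (fun x => x) true
  pvAnsLoop food ansArr

-- ===== PORT B =====
-- grid[r]
def pvRow (grid : List (List Int)) (r : Nat) : List Int := PySem.List.pyGetD grid (r : Int) []

-- 'for x in t: if v + x <= food: s.add(v + x)'
def pvAddFiltered (food v : Int) (s : PySem.Set Int) (t : List Int) : PySem.Set Int :=
  t.foldl (fun s x => if v + x ≤ food then PySem.Set.add s (v + x) else s) s

-- B's memoized 'reach'; the memo table is an implementation detail (same values), ported as
-- structural recursion with a fuel bound (fuel > r + c suffices; proved fuel-irrelevant below)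
def reachB (food : Int) (grid : List (List Int)) : Nat → Nat → Nat → PySem.Set Int
  | 0, _, _ => []
  | fuel + 1, r, c =>
    if (pvRow grid r).length ≤ c then []
    else if r = 0 ∧ c = 0 then PySem.Set.add [] (PySem.List.pyGetD (pvRow grid 0) 0 0)
    else
      let v := PySem.List.pyGetD (pvRow grid r) (c : Int) 0
      let s0 : PySem.Set Int := []
      let s1 := if 0 < r then pvAddFiltered food v s0 (reachB food grid fuel (r - 1) c) else s0
      if 0 < c then pvAddFiltered food v s1 (reachB food grid fuel r (c - 1)) else s1

def answer_alt (food : Int) (grid : List (List Int)) : Int :=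
  let n := grid.length
  let best := (reachB food grid ((n - 1) + (n - 1) + 1) (n - 1) (n - 1)).foldl
      (fun b x => match b with
        | none => if x ≤ food then some x else none
        | some m => if x ≤ food ∧ m < x then some x else some m) (none : Option Int)
  match best with
  | none => -1
  | some m => food - m

-- ===== PRECONDITION & SPEC =====
-- Pre_ excludes exactly the inputs where A raises IndexError: the empty grid, an empty first row
-- (grid[0][0]), and a row longer than len(grid) (a_grid[row][col] out of range).
def Pre_answer (food : Int) (grid : List (List Int)) : Prop :=
  grid ≠ [] ∧ PySem.List.pyGetD grid 0 [] ≠ [] ∧ ∀ row ∈ grid, row.length ≤ grid.length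
instance (food : Int) (grid : List (List Int)) : Decidable (Pre_answer food grid) := by unfold Pre_answer; infer_instance

def pvWitness_answer : Int × List (List Int) := (5, [[1, 2], [3, 4]])

def Spec_answer (food : Int) (grid : List (List Int)) (out : Int) : Prop := out = answer_alt food grid
instance (food : Int) (grid : List (List Int)) (out : Int) : Decidable (Spec_answer food grid out) := by unfold Spec_answer; infer_instance

-- ===== CLAIM (what is proved, stated in full; the proofs are below) =====
def Claim_equal_answer : Prop := ∀ (food : Int) (grid : List (List Int)), Dom_answer food grid → Pre_answer food grid → Spec_answer food grid (answer food grid)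


-- ===== LEMMAS AND PROOFS =====

-- two nodup lists with the same members
def EquivSet (s t : List Int) : Prop := s.Nodup ∧ ∀ x, x ∈ s ↔ x ∈ t

-- canonical 'max of the elements ≤ food' fold
def maxFold (food : Int) (b : Option Int) (l : List Int) : Option Int :=
  l.foldl (fun b x => if x ≤ food then some (match b with | none => x | some m => max m x) else b) b

theorem maxFold_perm (food : Int) (b : Option Int) {l1 l2 : List Int} (h : l1.Perm l2) :
    maxFold food b l1 = maxFold food b l2 := by
  unfold maxFold
  refine h.foldl_eq' ?_ b
  intro x _ y _ b
  rcases b with _ | m <;> split_ifs <;> simp_all <;> omega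

theorem maxFold_some_of_max (food : Int) (t : List Int) (m : Int) (hm : ∀ y ∈ t, y ≤ m) :
    maxFold food (some m) t = some m := by
  induction t generalizing m with
  | nil => rfl
  | cons x t ih =>
    have hx : x ≤ m := hm x (by simp)
    have : max m x = m := by omega
    simp only [maxFold, List.foldl_cons]
    have h2 := ih m (fun y hy => hm y (by simp [hy]))
    simp only [maxFold] at h2
    split_ifs
    · rw [this]; exact h2
    · exact h2

theorem pvAnsLoop_sorted (food : Int) (l : List Int) (h : l.Pairwise (fun a b => b ≤ a)) :
    pvAnsLoop food l = (match maxFold food none l with | none => -1 | some m => food - m) := by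
  induction l with
  | nil => rfl
  | cons x t ih =>
    rcases List.pairwise_cons.mp h with ⟨hle, ht⟩
    by_cases hx : x ≤ food
    · simp only [pvAnsLoop, if_pos hx, maxFold, List.foldl_cons, if_pos hx]
      have : maxFold food (some x) t = some x := maxFold_some_of_max food t x hle
      simp only [maxFold] at this
      simp [this]
    · simp only [pvAnsLoop, if_neg hx, maxFold, List.foldl_cons, if_neg hx]
      exact ih ht

theorem mem_pvAddFiltered (food v : Int) (s : PySem.Set Int) (t : List Int) (x : Int) :
    x ∈ pvAddFiltered food v s t ↔ x ∈ s ∨ ∃ z ∈ t, v + z ≤ food ∧ x = v + z := by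
  induction t generalizing s with
  | nil => simp [pvAddFiltered]
  | cons a t ih =>
    simp only [pvAddFiltered, List.foldl_cons] at *
    split_ifs with ha <;> rw [ih] <;>
      simp only [PySem.Set.mem_add, List.mem_cons] <;>
      constructor <;> intro hmem
    · rcases hmem with (h | h) | ⟨z, hz, h1, h2⟩
      · exact Or.inl h
      · exact Or.inr ⟨a, Or.inl rfl, ha, h⟩
      · exact Or.inr ⟨z, Or.inr hz, h1, h2⟩
    · rcases hmem with h | ⟨z, hz | hz, h1, h2⟩
      · exact Or.inl (Or.inl h)
      · exact Or.inl (Or.inr (hz ▸ h2))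
      · exact Or.inr ⟨z, hz, h1, h2⟩
    · rcases hmem with h | ⟨z, hz, h1, h2⟩
      · exact Or.inl h
      · exact Or.inr ⟨z, Or.inr hz, h1, h2⟩
    · rcases hmem with h | ⟨z, hz | hz, h1, h2⟩
      · exact Or.inl h
      · exact absurd (hz ▸ h1) ha
      · exact Or.inr ⟨z, hz, h1, h2⟩

theorem nodup_pvAddFiltered (food v : Int) (s : PySem.Set Int) (t : List Int) (h : s.Nodup) :
    (pvAddFiltered food v s t).Nodup := by
  induction t generalizing s with
  | nil => exact h
  | cons a t ih =>
    simp only [pvAddFiltered, List.foldl_cons] at *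
    split_ifs
    · exact ih _ (PySem.Set.nodup_add _ _ h)
    · exact ih _ h

theorem reachB_fuel (food : Int) (grid : List (List Int)) :
    ∀ f1 f2 r c, r + c < f1 → r + c < f2 →
      reachB food grid f1 r c = reachB food grid f2 r c := by
  intro f1
  induction f1 with
  | zero => intro f2 r c h1; omega
  | succ f1 ih =>
    intro f2 r c h1 h2
    rcases f2 with _ | f2
    · omega
    simp only [reachB]
    split_ifs <;>
      first
        | rfl
        | omega
        | (rw [ih f2 (r - 1) c (by omega) (by omega), ih f2 r (c - 1) (by omega) (by omega)])
        | (rw [ih f2 (r - 1) c (by omega) (by omega)])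
        | (rw [ih f2 r (c - 1) (by omega) (by omega)])

-- fuel-free view of reachB used by the proofs
def Reach (food : Int) (grid : List (List Int)) (r c : Nat) : PySem.Set Int :=
  reachB food grid (r + c + 1) r c

theorem Reach_eq (food : Int) (grid : List (List Int)) (r c : Nat) :
    Reach food grid r c =
      if (pvRow grid r).length ≤ c then []
      else if r = 0 ∧ c = 0 then PySem.Set.add [] (PySem.List.pyGetD (pvRow grid 0) 0 0)
      else
        let v := PySem.List.pyGetD (pvRow grid r) (c : Int) 0
        let s1 := if 0 < r then pvAddFiltered food v [] (Reach food grid (r - 1) c) else []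
        if 0 < c then pvAddFiltered food v s1 (Reach food grid r (c - 1)) else s1 := by
  show reachB food grid (r + c + 1) r c = _
  conv_lhs => rw [reachB]
  split_ifs <;>
    first
      | rfl
      | omega
      | (rw [reachB_fuel food grid (r + c) ((r - 1) + c + 1) (r - 1) c (by omega) (by omega),
          reachB_fuel food grid (r + c) (r + (c - 1) + 1) r (c - 1) (by omega) (by omega)]; rfl)
      | (rw [reachB_fuel food grid (r + c) ((r - 1) + c + 1) (r - 1) c (by omega) (by omega)]; rfl)
      | (rw [reachB_fuel food grid (r + c) (r + (c - 1) + 1) r (c - 1) (by omega) (by omega)]; rfl)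

theorem Reach_nodup (food : Int) (grid : List (List Int)) (r c : Nat) :
    (Reach food grid r c).Nodup := by
  rw [Reach_eq]
  split_ifs <;>
    first
      | exact List.nodup_nil
      | (rw [PySem.Set.add_of_not_mem (by simp)]; exact List.nodup_singleton _)
      | exact nodup_pvAddFiltered _ _ _ _ (nodup_pvAddFiltered _ _ _ _ List.nodup_nil)
      | exact nodup_pvAddFiltered _ _ _ _ List.nodup_nil

theorem mem_pvComp (food y : Int) (s : PySem.Set Int) (x : Int) :
    x ∈ pvComp food y s ↔ ∃ z ∈ s, y + z ≤ food ∧ x = y + z := by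
  simp only [pvComp, PySem.Set.mem_ofList, List.mem_map, List.mem_filter]
  constructor
  · rintro ⟨z, ⟨hz, hle⟩, rfl⟩
    exact ⟨z, hz, by simpa using hle, rfl⟩
  · rintro ⟨z, hz, hle, rfl⟩
    exact ⟨z, ⟨hz, by simpa using hle⟩, rfl⟩

-- ===== table invariant =====

def pvE (ag : List (List (PySem.Set Int))) (i j : Nat) : PySem.Set Int := (ag.getD i []).getD j []

def Init (grid : List (List Int)) (i j : Nat) : PySem.Set Int :=
  if i = 0 ∧ j = 0 then [(grid.getD 0 []).getD 0 0] else []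

def Visited (grid : List (List Int)) (r c i j : Nat) : Prop :=
  (i < r ∨ (i = r ∧ j < c)) ∧ j < (grid.getD i []).length

def TabInv (food : Int) (grid : List (List Int)) (ag : List (List (PySem.Set Int))) (r c : Nat) : Prop :=
  ag.length = grid.length ∧ (∀ i, i < grid.length → (ag.getD i []).length = grid.length) ∧
  (∀ i j, i < grid.length → j < grid.length → Visited grid r c i j →
      EquivSet (pvE ag i j) (Reach food grid i j)) ∧
  (∀ i j, i < grid.length → j < grid.length → ¬ Visited grid r c i j → pvE ag i j = Init grid i j)

theorem pvRow_eq (grid : List (List Int)) (r : Nat) : pvRow grid r = grid.getD r [] := by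
  simp [pvRow]

theorem length_pvSet2 (ag : List (List (PySem.Set Int))) (i j : Nat) (v : PySem.Set Int) :
    (pvSet2 ag (i : Int) (j : Int) v).length = ag.length := by
  simp [pvSet2]

theorem pvSet2_natCast (ag : List (List (PySem.Set Int))) (i j : Nat) (v : PySem.Set Int) :
    pvSet2 ag (i : Int) (j : Int) v = ag.set i ((ag.getD i []).set j v) := by
  simp [pvSet2]

theorem rowlen_pvSet2 (ag : List (List (PySem.Set Int))) (i j : Nat) (v : PySem.Set Int)
    (i' : Nat) : ((pvSet2 ag (i : Int) (j : Int) v).getD i' []).length = (ag.getD i' []).length := by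
  rw [pvSet2_natCast]
  simp only [List.getD_eq_getElem?_getD, List.getElem?_set]
  split_ifs <;> simp_all [List.getElem?_eq_none]

theorem pvE_pvSet2 (ag : List (List (PySem.Set Int))) (i j : Nat) (v : PySem.Set Int)
    (hi : i < ag.length) (i' j' : Nat) :
    pvE (pvSet2 ag (i : Int) (j : Int) v) i' j' =
      if i' = i ∧ j' = j ∧ j < (ag.getD i []).length then v else pvE ag i' j' := by
  rw [pvSet2_natCast]
  unfold pvE
  by_cases hii : i' = i
  · subst hii
    have hrow : (ag.set i' ((ag.getD i' []).set j v)).getD i' [] = (ag.getD i' []).set j v := by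
      rw [List.getD_eq_getElem?_getD, List.getElem?_set, if_pos rfl, if_pos hi]; rfl
    rw [hrow]
    by_cases hjj : j' = j
    · subst hjj
      by_cases hjl : j' < (ag.getD i' []).length
      · rw [if_pos ⟨rfl, rfl, hjl⟩, List.getD_eq_getElem?_getD, List.getElem?_set,
          if_pos rfl, if_pos hjl]
        rfl
      · rw [if_neg (by tauto), List.getD_eq_getElem?_getD, List.getElem?_set,
          if_pos rfl, if_neg hjl]
        rw [List.getD_eq_getElem?_getD (l := ag.getD i' []) (i := j'),
          List.getElem?_eq_none (by omega)]
    · rw [if_neg (by tauto), List.getD_eq_getElem?_getD, List.getElem?_set,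
        if_neg (by omega), ← List.getD_eq_getElem?_getD]
  · rw [if_neg (by tauto), List.getD_eq_getElem?_getD (l := ag.set i _), List.getElem?_set,
      if_neg (by omega), ← List.getD_eq_getElem?_getD]

theorem tabinv_mono (food : Int) (grid : List (List Int)) (ag : List (List (PySem.Set Int)))
    (r c r' c' : Nat)
    (h : ∀ i j, i < grid.length → j < grid.length → j < (grid.getD i []).length →
      ((i < r ∨ (i = r ∧ j < c)) ↔ (i < r' ∨ (i = r' ∧ j < c')))) :
    TabInv food grid ag r c → TabInv food grid ag r' c' := by
  rintro ⟨h1, h2, h3, h4⟩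
  refine ⟨h1, h2, ?_, ?_⟩
  · intro i j hi hj hvis
    exact h3 i j hi hj ⟨(h i j hi hj hvis.2).2 hvis.1, hvis.2⟩
  · intro i j hi hj hnvis
    refine h4 i j hi hj ?_
    rintro ⟨hv, hjl⟩
    exact hnvis ⟨(h i j hi hj hjl).1 hv, hjl⟩

theorem tabinv_ready (food : Int) (grid : List (List Int)) (ag : List (List (PySem.Set Int)))
    (r c : Nat) (h0 : 0 < (grid.getD 0 []).length) (hinv : TabInv food grid ag r c)
    (i j : Nat) (hi : i < grid.length) (hj : j < grid.length)
    (hvis : i < r ∨ (i = r ∧ j < c)) :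
    EquivSet (pvE ag i j) (Reach food grid i j) := by
  obtain ⟨h1, h2, h3, h4⟩ := hinv
  by_cases hjl : j < (grid.getD i []).length
  · exact h3 i j hi hj ⟨hvis, hjl⟩
  · have he : pvE ag i j = Init grid i j := h4 i j hi hj (fun hv => hjl hv.2)
    have hinit : Init grid i j = [] := by
      unfold Init
      rw [if_neg]
      rintro ⟨rfl, rfl⟩
      exact hjl h0
    have hr : Reach food grid i j = [] := by
      rw [Reach_eq, if_pos]
      rw [pvRow_eq]
      omega
    rw [he, hinit, hr]
    exact ⟨List.nodup_nil, fun x => Iff.rfl⟩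

theorem vis_mono (grid : List (List Int)) (r c c' i j : Nat) (hcc : c ≤ c')
    (h : Visited grid r c i j) : Visited grid r c' i j := by
  unfold Visited at *; omega

theorem pvGet2_natCast (ag : List (List (PySem.Set Int))) (i j : Nat) :
    pvGet2 ag (i : Int) (j : Int) = pvE ag i j := by
  simp [pvGet2, pvE]

theorem tabinv_write (food : Int) (grid : List (List Int))
    (r c : Nat) (hr : r < grid.length) (hc : c < (grid.getD r []).length)
    (hcn : c < grid.length)
    (ag : List (List (PySem.Set Int))) (hinv : TabInv food grid ag r c)
    (bg : List (List (PySem.Set Int)))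
    (hbl : bg.length = grid.length)
    (hbrows : ∀ i, i < grid.length → (bg.getD i []).length = grid.length)
    (hsame : ∀ i j, i < grid.length → j < grid.length → ¬(i = r ∧ j = c) →
      pvE bg i j = pvE ag i j)
    (hent : EquivSet (pvE bg r c) (Reach food grid r c)) :
    TabInv food grid bg r (c + 1) := by
  obtain ⟨hlen, hrows, hvis, hunv⟩ := hinv
  refine ⟨hbl, hbrows, ?_, ?_⟩
  · rintro i j hi hj ⟨hv, hjl⟩
    by_cases hij : i = r ∧ j = c
    · obtain ⟨rfl, rfl⟩ := hij
      exact hent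
    · rw [hsame i j hi hj hij]
      exact hvis i j hi hj ⟨by omega, hjl⟩
  · intro i j hi hj hnv
    have hij : ¬(i = r ∧ j = c) := by
      rintro ⟨rfl, rfl⟩
      exact hnv ⟨Or.inr ⟨rfl, by omega⟩, hc⟩
    rw [hsame i j hi hj hij]
    exact hunv i j hi hj (fun hv => hnv (vis_mono grid r c (c + 1) i j (by omega) hv))

set_option maxHeartbeats 1600000 in
theorem cell_step (food : Int) (grid : List (List Int))
    (h0 : 0 < (grid.getD 0 []).length)
    (hrowlen : ∀ row ∈ grid, row.length ≤ grid.length)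
    (r c : Nat) (hr : r < grid.length) (hc : c < (grid.getD r []).length)
    (ag : List (List (PySem.Set Int))) (hinv : TabInv food grid ag r c) :
    TabInv food grid (pvInner food (r : Int) ag ((c : Int), (grid.getD r []).getD c 0)) r (c + 1) := by
  obtain ⟨hlen, hrows, hvis, hunv⟩ := hinv
  have hinv' : TabInv food grid ag r c := ⟨hlen, hrows, hvis, hunv⟩
  have hmem : grid.getD r [] ∈ grid := by
    rw [List.getD_eq_getElem?_getD, List.getElem?_eq_getElem hr]
    simpa using List.getElem_mem hr
  have hcn : c < grid.length := lt_of_lt_of_le hc (hrowlen _ hmem)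
  have hcur : pvE ag r c = Init grid r c := hunv r c hr hcn (by rintro ⟨h, _⟩; omega)
  by_cases hbase : r = 0 ∧ c = 0
  · obtain ⟨rfl, rfl⟩ := hbase
    simp only [pvInner, Nat.cast_zero, ne_eq, not_true_eq_false, if_false, ite_not, if_pos]
    refine tabinv_write food grid 0 0 hr hc hcn ag hinv' ag hlen hrows
      (fun i j _ _ _ => rfl) ?_
    rw [hcur]
    unfold Init
    rw [if_pos ⟨rfl, rfl⟩]
    rw [Reach_eq, if_neg (by rw [pvRow_eq]; omega), if_pos ⟨rfl, rfl⟩,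
      PySem.List.pyGetD_zero, pvRow_eq, PySem.Set.add_of_not_mem (by simp), List.nil_append]
    exact ⟨List.nodup_singleton _, fun x => Iff.rfl⟩
  · have hcur0 : pvE ag r c = [] := by rw [hcur]; unfold Init; rw [if_neg hbase]
    have hupE : 0 < r → EquivSet (pvE ag (r - 1) c) (Reach food grid (r - 1) c) :=
      fun h => tabinv_ready food grid ag r c h0 hinv' (r - 1) c (by omega) hcn (Or.inl (by omega))
    have hleftE : 0 < c → EquivSet (pvE ag r (c - 1)) (Reach food grid r (c - 1)) :=
      fun h => tabinv_ready food grid ag r c h0 hinv' r (c - 1) hr (by omega) (Or.inr ⟨rfl, by omega⟩)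
    have hy' : PySem.List.pyGetD (pvRow grid r) (c : Int) 0 = (grid.getD r []).getD c 0 := by
      rw [pvRow_eq]; simp
    have hReach : ∀ x, x ∈ Reach food grid r c ↔
        ((0 < r ∧ ∃ z ∈ Reach food grid (r - 1) c,
            (grid.getD r []).getD c 0 + z ≤ food ∧ x = (grid.getD r []).getD c 0 + z) ∨
         (0 < c ∧ ∃ z ∈ Reach food grid r (c - 1),
            (grid.getD r []).getD c 0 + z ≤ food ∧ x = (grid.getD r []).getD c 0 + z)) := by
      intro x
      rw [Reach_eq, if_neg (by rw [pvRow_eq]; omega), if_neg hbase]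
      dsimp only
      rw [hy']
      by_cases hrp : 0 < r <;> by_cases hcp : 0 < c
      · rw [if_pos hrp, if_pos hcp]
        simp only [mem_pvAddFiltered, List.not_mem_nil, false_or]
        simp [hrp, hcp]
      · rw [if_pos hrp, if_neg hcp]
        simp only [mem_pvAddFiltered, List.not_mem_nil, false_or]
        simp [hrp, hcp]
      · rw [if_neg hrp, if_pos hcp]
        simp only [mem_pvAddFiltered, List.not_mem_nil, false_or]
        simp [hrp, hcp]
      · omega
    have hW : ∀ (bg : List (List (PySem.Set Int))), bg.length = grid.length →
        (bg.getD r []).length = grid.length →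
        ∀ u i j, pvE (pvSet2 bg (r : Int) (c : Int) u) i j =
          if i = r ∧ j = c then u else pvE bg i j := by
      intro bg hbl hbr u i j
      rw [pvE_pvSet2 bg r c u (by omega) i j]
      by_cases h : i = r ∧ j = c
      · rw [if_pos ⟨h.1, h.2, by omega⟩, if_pos h]
      · rw [if_neg (fun hh => h ⟨hh.1, hh.2.1⟩), if_neg h]
    simp only [pvInner]
    by_cases hrp : 0 < r <;> by_cases hcp : 0 < c
    · -- both neighbours
      rw [if_pos (by omega : (r : Int) ≠ 0), if_pos (by omega : (c : Int) ≠ 0)]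
      rw [(by omega : (r : Int) - 1 = ((r - 1 : Nat) : Int)),
        (by omega : (c : Int) - 1 = ((c - 1 : Nat) : Int))]
      simp only [pvGet2_natCast]
      set u1 := PySem.Set.union (pvE ag r c)
        (pvComp food ((grid.getD r []).getD c 0) (pvE ag (r - 1) c)) with hu1
      set ag1 := pvSet2 ag (r : Int) (c : Int) u1 with hag1
      have hbl1 : ag1.length = grid.length := by rw [hag1, length_pvSet2]; exact hlen
      have hbrows1 : ∀ i, i < grid.length → (ag1.getD i []).length = grid.length := by
        intro i hi; rw [hag1, rowlen_pvSet2]; exact hrows i hi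
      set u2 := PySem.Set.union (pvE ag1 r c)
        (pvComp food ((grid.getD r []).getD c 0) (pvE ag1 r (c - 1))) with hu2
      have he1 : pvE ag1 r c = u1 := by rw [hag1, hW ag hlen (hrows r hr) u1 r c, if_pos ⟨rfl, rfl⟩]
      have he2 : pvE ag1 r (c - 1) = pvE ag r (c - 1) := by
        rw [hag1, hW ag hlen (hrows r hr) u1 r (c - 1), if_neg (by omega)]
      refine tabinv_write food grid r c hr hc hcn ag hinv' _
        (by rw [length_pvSet2]; exact hbl1)
        (fun i hi => by rw [rowlen_pvSet2]; exact hbrows1 i hi)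
        (fun i j hi hj hij => by
          rw [hW ag1 hbl1 (hbrows1 r hr) u2 i j, if_neg hij, hag1,
            hW ag hlen (hrows r hr) u1 i j, if_neg hij])
        ?_
      rw [hW ag1 hbl1 (hbrows1 r hr) u2 r c, if_pos ⟨rfl, rfl⟩]
      constructor
      · rw [hu2, he1, hu1, hcur0]
        exact PySem.Set.nodup_union _ _ (PySem.Set.nodup_union _ _ List.nodup_nil)
      · intro x
        rw [hReach x, hu2, PySem.Set.mem_union, he1, hu1, hcur0, PySem.Set.mem_union, he2]
        simp only [mem_pvComp, List.not_mem_nil, false_or]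
        constructor
        · rintro ((⟨z, hz, h1, h2⟩) | ⟨z, hz, h1, h2⟩)
          · exact Or.inl ⟨hrp, z, ((hupE hrp).2 z).1 hz, h1, h2⟩
          · exact Or.inr ⟨hcp, z, ((hleftE hcp).2 z).1 hz, h1, h2⟩
        · rintro (⟨_, z, hz, h1, h2⟩ | ⟨_, z, hz, h1, h2⟩)
          · exact Or.inl ⟨z, ((hupE hrp).2 z).2 hz, h1, h2⟩
          · exact Or.inr ⟨z, ((hleftE hcp).2 z).2 hz, h1, h2⟩
    · -- only up
      rw [if_pos (by omega : (r : Int) ≠ 0), if_neg (by omega : ¬(c : Int) ≠ 0)]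
      rw [(by omega : (r : Int) - 1 = ((r - 1 : Nat) : Int))]
      simp only [pvGet2_natCast]
      refine tabinv_write food grid r c hr hc hcn ag hinv' _
        (by rw [length_pvSet2]; exact hlen)
        (fun i hi => by rw [rowlen_pvSet2]; exact hrows i hi)
        (fun i j hi hj hij => by rw [hW ag hlen (hrows r hr) _ i j, if_neg hij])
        ?_
      rw [hW ag hlen (hrows r hr) _ r c, if_pos ⟨rfl, rfl⟩, hcur0]
      constructor
      · exact PySem.Set.nodup_union _ _ List.nodup_nil
      · intro x
        rw [hReach x, PySem.Set.mem_union]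
        simp only [mem_pvComp, List.not_mem_nil, false_or]
        constructor
        · rintro ⟨z, hz, h1, h2⟩
          exact Or.inl ⟨hrp, z, ((hupE hrp).2 z).1 hz, h1, h2⟩
        · rintro (⟨_, z, hz, h1, h2⟩ | ⟨hcp', _⟩)
          · exact ⟨z, ((hupE hrp).2 z).2 hz, h1, h2⟩
          · omega
    · -- only left
      rw [if_neg (by omega : ¬(r : Int) ≠ 0), if_pos (by omega : (c : Int) ≠ 0)]
      rw [(by omega : (c : Int) - 1 = ((c - 1 : Nat) : Int))]
      simp only [pvGet2_natCast]
      refine tabinv_write food grid r c hr hc hcn ag hinv' _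
        (by rw [length_pvSet2]; exact hlen)
        (fun i hi => by rw [rowlen_pvSet2]; exact hrows i hi)
        (fun i j hi hj hij => by rw [hW ag hlen (hrows r hr) _ i j, if_neg hij])
        ?_
      rw [hW ag hlen (hrows r hr) _ r c, if_pos ⟨rfl, rfl⟩, hcur0]
      constructor
      · exact PySem.Set.nodup_union _ _ List.nodup_nil
      · intro x
        rw [hReach x, PySem.Set.mem_union]
        simp only [mem_pvComp, List.not_mem_nil, false_or]
        constructor
        · rintro ⟨z, hz, h1, h2⟩
          exact Or.inr ⟨hcp, z, ((hleftE hcp).2 z).1 hz, h1, h2⟩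
        · rintro (⟨hrp', _⟩ | ⟨_, z, hz, h1, h2⟩)
          · omega
          · exact ⟨z, ((hleftE hcp).2 z).2 hz, h1, h2⟩
    · omega

theorem inner_fold (food : Int) (grid : List (List Int))
    (h0 : 0 < (grid.getD 0 []).length)
    (hrowlen : ∀ row ∈ grid, row.length ≤ grid.length)
    (r : Nat) (hr : r < grid.length) :
    ∀ (t : List Int) (c : Nat) (ag), t = (grid.getD r []).drop c →
      TabInv food grid ag r c →
      TabInv food grid ((PySem.List.enumerate t (c : Int)).foldl (pvInner food (r : Int)) ag)
        r ((grid.getD r []).length) := by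
  intro t
  induction t with
  | nil =>
    intro c ag hdrop hinv
    simp only [PySem.List.enumerate_nil, List.foldl_nil]
    have hcl : (grid.getD r []).length ≤ c := by
      have := congrArg List.length hdrop
      simp only [List.length_nil, List.length_drop] at this
      omega
    refine tabinv_mono food grid ag r c r ((grid.getD r []).length) ?_ hinv
    intro i j hi hj hjl
    by_cases hir : i = r
    · subst hir; omega
    · omega
  | cons a t ih =>
    intro c ag hdrop hinv
    have hlc : c + t.length + 1 = (grid.getD r []).length := by
      have := congrArg List.length hdrop
      simp only [List.length_cons, List.length_drop] at this
      omega
    have hc : c < (grid.getD r []).length := by omega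
    have h1 : (grid.getD r [])[c]? = some a := by
      have h2 : ((grid.getD r []).drop c)[0]? = some a := by rw [← hdrop]; rfl
      rw [List.getElem?_drop] at h2
      simpa using h2
    have ha : a = (grid.getD r []).getD c 0 := by
      rw [List.getD_eq_getElem?_getD, h1]; rfl
    rw [PySem.List.enumerate_cons, List.foldl_cons]
    have hstep := cell_step food grid h0 hrowlen r c hr hc ag hinv
    rw [← ha] at hstep
    have ht : t = (grid.getD r []).drop (c + 1) := by
      rw [← List.tail_drop, ← hdrop]
      rfl
    have hres := ih (c + 1) _ ht hstep
    rw [(by push_cast; ring : ((c : Int) + 1) = (((c + 1 : Nat)) : Int))]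
    exact hres

theorem outer_fold (food : Int) (grid : List (List Int))
    (h0 : 0 < (grid.getD 0 []).length)
    (hrowlen : ∀ row ∈ grid, row.length ≤ grid.length) :
    ∀ (L : List (List Int)) (r : Nat) (ag), L = grid.drop r →
      TabInv food grid ag r 0 →
      TabInv food grid ((PySem.List.enumerate L (r : Int)).foldl
        (fun ag rx => (PySem.List.enumerate rx.2 0).foldl (pvInner food rx.1) ag) ag)
        grid.length 0 := by
  intro L
  induction L with
  | nil =>
    intro r ag hdrop hinv
    simp only [PySem.List.enumerate_nil, List.foldl_nil]
    have hnr : grid.length ≤ r := by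
      have := congrArg List.length hdrop
      simp only [List.length_nil, List.length_drop] at this
      omega
    exact tabinv_mono food grid ag r 0 grid.length 0 (fun i j hi hj hjl => by omega) hinv
  | cons x L ih =>
    intro r ag hdrop hinv
    have hr : r < grid.length := by
      have := congrArg List.length hdrop
      simp only [List.length_cons, List.length_drop] at this
      omega
    have hx : x = grid.getD r [] := by
      have h2 : (grid.drop r)[0]? = some x := by rw [← hdrop]; rfl
      rw [List.getElem?_drop] at h2
      rw [List.getD_eq_getElem?_getD]
      simp at h2
      rw [h2]
      rfl
    rw [PySem.List.enumerate_cons, List.foldl_cons]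
    have hin := inner_fold food grid h0 hrowlen r hr x 0 ag
      (by rw [hx, List.drop_zero]) hinv
    have hnext : TabInv food grid ((PySem.List.enumerate x ((0 : Nat) : Int)).foldl
        (pvInner food (r : Int)) ag) (r + 1) 0 := by
      refine tabinv_mono food grid _ r ((grid.getD r []).length) (r + 1) 0 ?_ hin
      intro i j hi hj hjl
      by_cases hir : i = r
      · subst hir; omega
      · omega
    have ht : L = grid.drop (r + 1) := by
      rw [← List.tail_drop, ← hdrop]
      rfl
    have hres := ih (r + 1) _ ht hnext
    rw [(by push_cast; ring : ((r : Int) + 1) = (((r + 1 : Nat)) : Int))]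
    exact hres

theorem tabinv_init (food : Int) (grid : List (List Int)) (hne : grid ≠ [])
    (h0 : 0 < (grid.getD 0 []).length) :
    TabInv food grid (pvSet2 ((PySem.List.pyRange 0 (PySem.List.len grid) 1).map
        (fun _ => (PySem.List.pyRange 0 (PySem.List.len grid) 1).map (fun _ => ([] : PySem.Set Int))))
      0 0 (PySem.Set.add [] (PySem.List.pyGetD (PySem.List.pyGetD grid 0 []) 0 0))) 0 0 := by
  have hn : 0 < grid.length := List.length_pos_of_ne_nil hne
  have hcast : PySem.List.len grid = ((grid.length : Nat) : Int) := by simp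
  have hrow : ∀ i : Nat, i < grid.length →
      ((PySem.List.pyRange 0 (PySem.List.len grid) 1).map
        (fun _ => (PySem.List.pyRange 0 (PySem.List.len grid) 1).map
          (fun _ => ([] : PySem.Set Int)))).getD i []
      = (PySem.List.pyRange 0 (PySem.List.len grid) 1).map (fun _ => ([] : PySem.Set Int)) := by
    intro i hi
    rw [List.getD_eq_getElem?_getD, hcast, PySem.List.getElem?_map_pyRange_zero _ _ _ hi]
    rfl
  have hinlen : ((PySem.List.pyRange 0 (PySem.List.len grid) 1).map
      (fun _ => ([] : PySem.Set Int))).length = grid.length := by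
    rw [hcast]
    simp [PySem.List.length_pyRange_one]
  have hincell : ∀ j : Nat, ((PySem.List.pyRange 0 (PySem.List.len grid) 1).map
      (fun _ => ([] : PySem.Set Int))).getD j [] = [] := by
    intro j
    rw [List.getD_eq_getElem?_getD]
    rcases h : ((PySem.List.pyRange 0 (PySem.List.len grid) 1).map
      (fun _ => ([] : PySem.Set Int)))[j]? with _ | w
    · rfl
    · have hmem := List.mem_of_getElem? h
      rw [List.mem_map] at hmem
      obtain ⟨z, _, rfl⟩ := hmem
      rfl
  have hbl : ((PySem.List.pyRange 0 (PySem.List.len grid) 1).map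
      (fun _ => (PySem.List.pyRange 0 (PySem.List.len grid) 1).map
        (fun _ => ([] : PySem.Set Int)))).length = grid.length := by
    rw [hcast]
    simp [PySem.List.length_pyRange_one]
  show TabInv food grid (pvSet2 _ (((0 : Nat)) : Int) (((0 : Nat)) : Int) _) 0 0
  refine ⟨?_, ?_, ?_, ?_⟩
  · rw [length_pvSet2]
    exact hbl
  · intro i hi
    rw [rowlen_pvSet2, hrow i hi, hinlen]
  · rintro i j hi hj ⟨hv, hjl⟩
    omega
  · intro i j hi hj hnv
    rw [pvE_pvSet2 _ _ _ _ (by omega) i j]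
    by_cases hij : i = 0 ∧ j = 0
    · obtain ⟨rfl, rfl⟩ := hij
      rw [if_pos ⟨rfl, rfl, by rw [hrow 0 hn, hinlen]; omega⟩]
      unfold Init
      rw [if_pos ⟨rfl, rfl⟩, PySem.Set.add_of_not_mem (by simp), List.nil_append,
        PySem.List.pyGetD_zero, PySem.List.pyGetD_zero]
    · rw [if_neg (by tauto)]
      unfold pvE Init
      rw [if_neg hij, hrow i hi, hincell j]

theorem bfold_eq_maxFold (food : Int) (l : List Int) (b : Option Int) :
    l.foldl (fun b x => match b with
      | none => if x ≤ food then some x else none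
      | some m => if x ≤ food ∧ m < x then some x else some m) b = maxFold food b l := by
  have hf : (fun (b : Option Int) (x : Int) => match b with
      | none => if x ≤ food then some x else none
      | some m => if x ≤ food ∧ m < x then some x else some m)
      = (fun (b : Option Int) (x : Int) =>
          if x ≤ food then some (match b with | none => x | some m => max m x) else b) := by
    funext b x
    rcases b with _ | m
    · rfl
    · dsimp only
      split_ifs with hA hB hC <;>
        first
          | rfl
          | (congr 1; omega)
  rw [maxFold, hf]

theorem answer_spec : Claim_equal_answer := by
  intro food grid hdom hpre
  obtain ⟨hne, h0, hrowlen⟩ := hpre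
  unfold Spec_answer
  have hn : 0 < grid.length := List.length_pos_of_ne_nil hne
  have h0' : 0 < (grid.getD 0 []).length := by
    rw [PySem.List.pyGetD_zero] at h0
    exact List.length_pos_of_ne_nil h0
  have hinit := tabinv_init food grid hne h0'
  have hfin := outer_fold food grid h0' hrowlen grid 0 _ (List.drop_zero (l := grid)).symm hinit
  rw [Nat.cast_zero] at hfin
  have hready := tabinv_ready food grid _ grid.length 0 h0' hfin
    (grid.length - 1) (grid.length - 1) (by omega) (by omega) (Or.inl (by omega))
  obtain ⟨hndS, hmemS⟩ := hready
  simp only [answer, answer_alt]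
  have hlen1 : PySem.List.len grid - 1 = ((grid.length - 1 : Nat) : Int) := by
    rw [PySem.List.len_eq]
    omega
  rw [hlen1, pvGet2_natCast]
  have hpw : (PySem.List.sorted (pvE ((PySem.List.enumerate grid 0).foldl
      (fun ag rx => (PySem.List.enumerate rx.2 0).foldl (pvInner food rx.1) ag)
      (pvSet2 ((PySem.List.pyRange 0 (PySem.List.len grid) 1).map
        (fun _ => (PySem.List.pyRange 0 (PySem.List.len grid) 1).map (fun _ => ([] : PySem.Set Int))))
        0 0 (PySem.Set.add [] (PySem.List.pyGetD (PySem.List.pyGetD grid 0 []) 0 0))))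
      (grid.length - 1) (grid.length - 1)) (fun x => x) true).Pairwise (fun a b => b ≤ a) := by
    simpa using PySem.List.sorted_pairwise_rev (xs := _) (key := fun (x : Int) => x)
  rw [pvAnsLoop_sorted food _ hpw]
  rw [maxFold_perm food none (PySem.List.sorted_perm _ _ _)]
  rw [maxFold_perm food none
    ((List.perm_ext_iff_of_nodup hndS (Reach_nodup food grid _ _)).mpr hmemS)]
  rw [bfold_eq_maxFold]
  rfl
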